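-- pv_equiv track=rewrite | github.com/szeitlin/Rosalind | o3_overlap.py | itertools_combinations
-- ===== SOURCE A (Python) =====
-- import itertools
--
-- def just_check_ends(one, two):
--     front1 = one[1][0:3]
--     end1 = one[1][-3:]
--     front2 = two[1][0:3]
--     end2 = two[1][-3:]
--
--     if end1==front2:
--         return (one, two)
--     elif end2 == front1:
--         return (two, one)
--     else:
--         return
--
-- def itertools_combinations(labeled):
--     """
--     Try this to do all 100,000 comparisons.
--
--     :param labeled:
--     :return:
--     """
--     matches = []
--
--     pairs = itertools.permutations(labeled, 2) #all possible orderings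
--     for pair in list(pairs):
--         #result = get_o3_overlap(pair[0], pair[1], debug=True)
--         result = just_check_ends(pair[0], pair[1])
--         if result is not None:
--             if result not in matches:
--                 matches.append(result)
--
--     return matches
-- ===== SOURCE B (Python) =====
-- def itertools_combinations(labeled):
--     """
--     Overlap pairs via hash indexes on 3-char prefixes/suffixes: for each item,
--     look up its candidate partners by key, walk them in index order, and dedup
--     results with a set.
--     """
--     pre = {}
--     suf = {}
--     for j, item in enumerate(labeled):
--         pre.setdefault(item[1][:3], []).append(j)
--         suf.setdefault(item[1][-3:], []).append(j)
--
--     seen = set()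
--     out = []
--     for i, x in enumerate(labeled):
--         fwd = set(pre.get(x[1][-3:], []))   # j with prefix(y) == suffix(x): pair (x, y)
--         bwd = set(suf.get(x[1][:3], []))    # j with suffix(y) == prefix(x): pair (y, x)
--         for j in sorted(fwd | bwd):
--             if j == i:
--                 continue
--             t = (x, labeled[j]) if j in fwd else (labeled[j], x)
--             if t not in seen:
--                 seen.add(t)
--                 out.append(t)
--     return out
-- ===== Notes on version B (the rewrite author's own statement) =====
-- stated objective: faster
-- what changed: A scans all O(n^2) ordered pairs (itertools.permutations) and dedups by O(m) list membership; B builds hash indexes keyed by 3-char prefix/suffix once, walks each item's looked-up candidate indices in sorted order, and dedups with a set.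
import Mathlib
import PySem

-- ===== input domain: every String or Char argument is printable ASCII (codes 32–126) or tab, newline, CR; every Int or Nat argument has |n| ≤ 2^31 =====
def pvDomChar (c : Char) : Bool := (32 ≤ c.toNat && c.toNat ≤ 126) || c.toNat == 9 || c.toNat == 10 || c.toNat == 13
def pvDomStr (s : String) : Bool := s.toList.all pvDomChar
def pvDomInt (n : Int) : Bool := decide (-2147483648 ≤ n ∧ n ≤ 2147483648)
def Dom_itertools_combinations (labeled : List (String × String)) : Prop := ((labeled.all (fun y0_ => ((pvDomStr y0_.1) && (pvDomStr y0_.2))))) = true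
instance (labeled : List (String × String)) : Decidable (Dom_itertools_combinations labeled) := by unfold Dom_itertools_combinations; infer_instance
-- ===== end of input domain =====

-- B replaces A's scan of all O(n^2) ordered pairs (with O(m) list-membership dedup) by hash
-- indexes keyed on 3-char prefixes/suffixes, a walk over each item's candidate indices in
-- sorted order, and set-based dedup; same return value (objective: faster).


-- ===== PORT A =====
def justCheckEnds (one two : String × String) :
    Option ((String × String) × (String × String)) :=
  let front1 := PySem.Str.slice one.2 (some 0) (some 3)
  let end1 := PySem.Str.slice one.2 (some (-3)) none
  let front2 := PySem.Str.slice two.2 (some 0) (some 3)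
  let end2 := PySem.Str.slice two.2 (some (-3)) none
  if end1 = front2 then some (one, two)
  else if end2 = front1 then some (two, one)
  else none

-- pair[0] / pair[1]: every element of permutations labeled 2 has length 2, so the default is never used
def itertools_combinations (labeled : List (String × String)) :
    List ((String × String) × (String × String)) :=
  (PySem.List.permutations labeled 2).foldl
    (fun ms pair =>
      match justCheckEnds (PySem.List.pyGetD pair 0 ("", "")) (PySem.List.pyGetD pair 1 ("", "")) with
      | none => ms
      | some r => if r ∈ ms then ms else ms ++ [r])
    []

-- ===== PORT B =====
def pre3 (s : String) : String := PySem.Str.slice s (some 0) (some 3)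

def suf3 (s : String) : String := PySem.Str.slice s (some (-3)) none

-- labeled[j]: j is always a valid nonnegative index here, so the default is never used
def itertools_combinations_alt (labeled : List (String × String)) :
    List ((String × String) × (String × String)) :=
  let enum := PySem.List.enumerate labeled
  -- the index-building loop: pre.setdefault(s[:3], []).append(j); suf.setdefault(s[-3:], []).append(j)
  let idxs := enum.foldl
    (fun d p => (d.1.modify (pre3 p.2.2) [] (· ++ [p.1]), d.2.modify (suf3 p.2.2) [] (· ++ [p.1])))
    (PySem.Dict.empty, PySem.Dict.empty)
  (enum.foldl
    (fun st p =>
      let fwd : PySem.Set Int := PySem.Set.ofList (idxs.1.getD (suf3 p.2.2) [])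
      let bwd : PySem.Set Int := PySem.Set.ofList (idxs.2.getD (pre3 p.2.2) [])
      (PySem.List.sorted (PySem.Set.union fwd bwd) (fun j => j) false).foldl
        (fun st j =>
          if j = p.1 then st
          else
            let t := if PySem.Set.contains fwd j
                     then (p.2, PySem.List.pyGetD labeled j ("", ""))
                     else (PySem.List.pyGetD labeled j ("", ""), p.2)
            if PySem.Set.contains st.1 t then st
            else (PySem.Set.add st.1 t, st.2 ++ [t]))
        st)
    ((PySem.Set.empty : PySem.Set ((String × String) × (String × String))), [])).2

-- ===== PRECONDITION & SPEC =====
def Spec_itertools_combinations (labeled : List (String × String)) (out : List ((String × String) × (String × String))) : Prop := out = itertools_combinations_alt labeled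
instance (labeled : List (String × String)) (out : List ((String × String) × (String × String))) : Decidable (Spec_itertools_combinations labeled out) := by unfold Spec_itertools_combinations; infer_instance

-- ===== CLAIM (what is proved, stated in full; the proofs are below) =====
def Claim_equal_itertools_combinations : Prop := ∀ (labeled : List (String × String)), Dom_itertools_combinations labeled → Spec_itertools_combinations labeled (itertools_combinations labeled)

-- ===== LEMMAS AND PROOFS =====

-- the common dedup step ("if r not in matches: matches.append(r)")
def dstep (m : List ((String × String) × (String × String)))
    (r : (String × String) × (String × String)) :
    List ((String × String) × (String × String)) :=
  if r ∈ m then m else m ++ [r]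

-- the first-occurrence stream both programs dedup: for every ordered pair of distinct
-- positions (q, p), the oriented overlap justCheckEnds q.2 p.2
def canonStream (labeled : List (String × String)) :
    List ((String × String) × (String × String)) :=
  (PySem.List.enumerate labeled).flatMap
    (fun q => (PySem.List.enumerate labeled).filterMap
      (fun p => if p.1 = q.1 then none else justCheckEnds q.2 p.2))

lemma foldl_match_filterMap {γ : Type} (f : γ → Option ((String × String) × (String × String))) :
    ∀ (l : List γ) (m : List ((String × String) × (String × String))),
      l.foldl (fun ms x => match f x with | none => ms | some r => if r ∈ ms then ms else ms ++ [r]) m =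
        (l.filterMap f).foldl dstep m := by
  intro l
  induction l with
  | nil => intro m; rfl
  | cons h t ih =>
      intro m
      simp only [List.foldl_cons, List.filterMap_cons]
      cases f h <;> simp [ih, dstep]

lemma perm_succ {α : Type} (xs : List α) (r : Nat) :
    PySem.List.permutations xs (r+1) =
      (List.range xs.length).flatMap
        (fun i => match xs[i]? with
          | none => []
          | some x => (PySem.List.permutations (xs.eraseIdx i) r).map (x :: ·)) := by rfl

lemma perm_one (ys : List (String × String)) :
    PySem.List.permutations ys 1 = ys.map (fun y => [y]) := by
  rw [perm_succ]
  refine Eq.trans (List.flatMap_congr (g := fun i => [[ys.getD i ("", "")]]) ?_) ?_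
  · intro i hi
    rw [List.mem_range] at hi
    rw [List.getElem?_eq_getElem hi]
    simp [PySem.List.permutations, List.getD, List.getElem?_eq_getElem hi]
  · rw [← List.map_eq_flatMap]
    apply List.ext_getElem
    · simp
    · intro i h1 h2
      simp only [List.getElem_map, List.getElem_range]
      rw [List.getD_eq_getElem?_getD]
      simp at h1
      simp [List.getElem?_eq_getElem (by simpa using h1)]

lemma perm_two (xs : List (String × String)) :
    PySem.List.permutations xs 2 =
      (List.range xs.length).flatMap
        (fun i => (xs.eraseIdx i).map (fun y => [xs.getD i ("", ""), y])) := by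
  rw [perm_succ]
  apply List.flatMap_congr
  intro i hi
  rw [List.mem_range] at hi
  rw [List.getElem?_eq_getElem hi, perm_one]
  simp [List.getD, List.getElem?_eq_getElem hi, List.map_map, Function.comp]

lemma eraseIdx_filterMap_enum {α β : Type} (g : α → Option β) :
    ∀ (xs : List α) (s i : Nat),
      (xs.eraseIdx i).filterMap g =
        (PySem.List.enumerate xs (s : Int)).filterMap
          (fun p => if p.1 = ((s + i : Nat) : Int) then none else g p.2) := by
  intro xs
  induction xs with
  | nil => intro s i; simp [PySem.List.enumerate_nil]
  | cons x t ih =>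
      intro s i
      cases i with
      | zero =>
          rw [PySem.List.enumerate_cons, List.filterMap_cons]
          have h0 : ((s : Int) = ((s + 0 : Nat) : Int)) := by push_cast; ring
          rw [if_pos h0]
          rw [List.eraseIdx_zero, List.tail_cons]
          have hne : ∀ p ∈ PySem.List.enumerate t ((s : Int) + 1),
              (if p.1 = ((s + 0 : Nat) : Int) then (none : Option β) else g p.2) = g p.2 := by
            intro p hp
            rw [PySem.List.mem_enumerate_iff] at hp
            obtain ⟨k, hk, rfl⟩ := hp
            simp only []
            rw [if_neg (by push_cast; omega)]
          rw [List.filterMap_congr hne]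
          conv_lhs => rw [← PySem.List.map_snd_enumerate t ((s : Int) + 1)]
          rw [List.filterMap_map]
          rfl
      | succ i =>
          rw [PySem.List.enumerate_cons, List.filterMap_cons, List.eraseIdx_cons_succ,
            List.filterMap_cons]
          rw [if_neg (by push_cast; omega)]
          have := ih (s + 1) i
          have hcast : (((s + 1) + i : Nat) : Int) = ((s + (i + 1) : Nat) : Int) := by
            push_cast; ring
          rw [hcast] at this
          rw [this]
          push_cast
          cases g x <;> rfl

lemma set_dedup_fold :
    ∀ (stream : List ((String × String) × (String × String)))
      (seen : PySem.Set ((String × String) × (String × String)))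
      (out : List ((String × String) × (String × String))),
      (∀ r, r ∈ seen ↔ r ∈ out) →
      (stream.foldl
        (fun st t =>
          if PySem.Set.contains st.1 t then st else (PySem.Set.add st.1 t, st.2 ++ [t]))
        (seen, out)).2 = stream.foldl dstep out := by
  intro stream
  induction stream with
  | nil => intro seen out hinv; rfl
  | cons t s ih =>
      intro seen out hinv
      simp only [List.foldl_cons, dstep]
      by_cases hmem : t ∈ out
      · rw [if_pos (by rw [PySem.Set.contains_iff]; exact (hinv t).mpr hmem), if_pos hmem]
        exact ih seen out hinv
      · rw [if_neg (by rw [PySem.Set.contains_iff]; exact fun h => hmem ((hinv t).mp h)),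
          if_neg hmem]
        apply ih
        intro r
        rw [PySem.Set.mem_add, List.mem_append, hinv r, List.mem_singleton]

lemma flatMap_enum {R : Type} (xs : List (String × String))
    (G : Int × (String × String) → List R) :
    (PySem.List.enumerate xs).flatMap G =
      (List.range xs.length).flatMap (fun (k : Nat) => G ((k : Int), xs.getD k ("", ""))) := by
  rw [PySem.List.enumerate_eq_map_pyRange xs ("", ""), PySem.List.pyRange_one, List.flatMap_map,
    List.flatMap_map]
  have hlen : ((PySem.List.len xs - 0).toNat) = xs.length := by
    simp [PySem.List.len_eq]
  rw [hlen]
  apply List.flatMap_congr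
  intro k _
  simp

lemma streamA_eq_canon (labeled : List (String × String)) :
    (PySem.List.permutations labeled 2).filterMap
      (fun pair => justCheckEnds (PySem.List.pyGetD pair 0 ("", "")) (PySem.List.pyGetD pair 1 ("", ""))) =
      canonStream labeled := by
  rw [perm_two, List.filterMap_flatMap]
  unfold canonStream
  rw [flatMap_enum]
  apply List.flatMap_congr
  intro i hi
  rw [List.mem_range] at hi
  rw [List.filterMap_map]
  have hfun : ∀ y ∈ labeled.eraseIdx i,
      ((fun pair => justCheckEnds (PySem.List.pyGetD pair 0 ("", "")) (PySem.List.pyGetD pair 1 ("", ""))) ∘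
        (fun y => [labeled.getD i ("", ""), y])) y =
        justCheckEnds (labeled.getD i ("", "")) y := by
    intro y _
    simp only [Function.comp_apply]
    rw [show PySem.List.pyGetD [labeled.getD i ("", ""), y] 0 ("", "") = labeled.getD i ("", "")
        from by simp [pysem],
      show PySem.List.pyGetD [labeled.getD i ("", ""), y] 1 ("", "") = y from by simp [pysem]]
  rw [List.filterMap_congr hfun, eraseIdx_filterMap_enum (justCheckEnds (labeled.getD i ("", ""))) labeled 0 i]
  apply List.filterMap_congr
  intro p _
  norm_num

-- B-side abbreviations used only in the proofs
def Pfwd (x : String × String) (q : Int × (String × String)) : Bool := pre3 q.2.2 == suf3 x.2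
def Qbwd (x : String × String) (q : Int × (String × String)) : Bool := suf3 q.2.2 == pre3 x.2

-- justCheckEnds in terms of the forward/backward predicates
lemma jce_head (x : String × String) (q : Int × (String × String)) :
    justCheckEnds x q.2 =
      (if Pfwd x q then some (x, q.2) else if Qbwd x q then some (q.2, x) else none) := by
  simp only [justCheckEnds, Pfwd, Qbwd, pre3, suf3, beq_iff_eq]
  by_cases h1 : PySem.Str.slice x.2 (some (-3)) none = PySem.Str.slice q.2.2 (some 0) (some 3)
  · rw [if_pos h1, if_pos h1.symm]
  · have hp : ¬(PySem.Str.slice q.2.2 (some 0) (some 3) = PySem.Str.slice x.2 (some (-3)) none) :=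
      fun h => h1 h.symm
    rw [if_neg h1, if_neg hp]

-- splitting the canonical per-item stream into the forward/backward candidate form
lemma stream_split (x : String × String) (i : Int) :
    ∀ (l : List (Int × (String × String))),
      l.filterMap (fun p => if p.1 = i then none else justCheckEnds x p.2) =
        ((l.filter (fun q => Pfwd x q || Qbwd x q)).filter (fun q => !(q.1 == i))).map
          (fun q => if Pfwd x q then (x, q.2) else (q.2, x)) := by
  intro l
  induction l with
  | nil => rfl
  | cons q t ih =>
      rw [List.filterMap_cons, List.filter_cons]
      by_cases hi : q.1 = i
      · rw [if_pos hi]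
        by_cases hPQ : (Pfwd x q || Qbwd x q) = true
        · rw [if_pos hPQ, List.filter_cons, if_neg (by simp [hi]), ih]
        · rw [if_neg hPQ, ih]
      · rw [if_neg hi, jce_head x q]
        by_cases hP : Pfwd x q = true
        · rw [if_pos hP, if_pos (by simp [hP]), List.filter_cons, if_pos (by simp [hi]),
            List.map_cons, if_pos hP, ih]
        · by_cases hQ : Qbwd x q = true
          · rw [if_neg hP, if_pos hQ, if_pos (by simp [hQ]), List.filter_cons,
              if_pos (by simp [hi]), List.map_cons, if_neg hP, ih]
          · rw [if_neg hP, if_neg hQ, if_neg (by simp [hP, hQ]), ih]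

-- first components of an enumeration are injective
lemma enum_fst_inj {xs : List (String × String)} {s : Int}
    {q q' : Int × (String × String)} (hq : q ∈ PySem.List.enumerate xs s)
    (hq' : q' ∈ PySem.List.enumerate xs s) (h : q.1 = q'.1) : q = q' := by
  rw [PySem.List.mem_enumerate_iff] at hq hq'
  obtain ⟨k, hk, rfl⟩ := hq
  obtain ⟨k', hk', rfl⟩ := hq'
  simp only [] at h
  have : k = k' := by omega
  subst this
  rfl

-- inner loop: skipping index i and deduping is the dedup fold of the mapped filtered list
lemma foldl_skip {τ : Type} (i : Int) (t : Int → τ)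
    (g : PySem.Set τ × List τ → τ → PySem.Set τ × List τ) :
    ∀ (l : List Int) (st : PySem.Set τ × List τ),
      l.foldl (fun st j => if j = i then st else g st (t j)) st =
        ((l.filter (fun j => !(j == i))).map t).foldl g st := by
  intro l
  induction l with
  | nil => intro st; rfl
  | cons j l ih =>
      intro st
      rw [List.foldl_cons, List.filter_cons]
      by_cases hj : j = i
      · rw [if_pos hj, if_neg (by simp [hj]), ih]
      · rw [if_neg hj, if_pos (by simp [hj]), List.map_cons, List.foldl_cons, ih]

lemma pairwise_lt_fst_filter (labeled : List (String × String))
    (P : Int × (String × String) → Bool) :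
    (((PySem.List.enumerate labeled).filter P).map (fun q => q.1)).Pairwise (· < ·) := by
  apply List.Pairwise.map
  · exact fun a b h => h
  · exact (PySem.List.pairwise_lt_enumerate labeled 0).filter P

lemma nodup_fst_filter (labeled : List (String × String))
    (P : Int × (String × String) → Bool) :
    (((PySem.List.enumerate labeled).filter P).map (fun q => q.1)).Nodup :=
  (pairwise_lt_fst_filter labeled P).imp ne_of_lt

-- the index dict built by the loop, looked up at key k, is the filtered index list
lemma idx_getD (labeled : List (String × String))
    (key : Int × (String × String) → String) (k : String) :
    ((PySem.List.enumerate labeled).foldl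
        (fun d p => d.modify (key p) [] (· ++ [p.1])) PySem.Dict.empty).getD k [] =
      (((PySem.List.enumerate labeled).filter (fun q => key q == k)).map (fun q => q.1)) := by
  have h : (PySem.List.enumerate labeled).foldl
      (fun d p => d.modify (key p) [] (· ++ [p.1])) PySem.Dict.empty =
      ((PySem.List.enumerate labeled).map (fun p => (key p, p.1))).foldl
        (fun d p => d.modify p.1 [] (· ++ [p.2])) PySem.Dict.empty := by
    rw [List.foldl_map]
  rw [h, PySem.Dict.getD_foldl_modify_append]
  rw [List.filter_map, List.map_map]
  simp [Function.comp_def]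

-- sorted(fwd | bwd) is the increasing list of indices matching either way
lemma sorted_union_eq (labeled : List (String × String)) (x : String × String) :
    PySem.List.sorted
        (PySem.Set.union
          (PySem.Set.ofList (((PySem.List.enumerate labeled).filter (fun q => Pfwd x q)).map (fun q => q.1)))
          (PySem.Set.ofList (((PySem.List.enumerate labeled).filter (fun q => Qbwd x q)).map (fun q => q.1))))
        (fun j => j) false =
      (((PySem.List.enumerate labeled).filter (fun q => Pfwd x q || Qbwd x q)).map (fun q => q.1)) := by
  apply PySem.List.sorted_eq_of_perm_of_pairwise_lt
  · rw [PySem.Set.ofList_eq_self_of_nodup _ (nodup_fst_filter labeled _),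
      PySem.Set.ofList_eq_self_of_nodup _ (nodup_fst_filter labeled _)]
    rw [List.perm_ext_iff_of_nodup (nodup_fst_filter labeled _)
      (PySem.Set.nodup_union _ _ ((nodup_fst_filter labeled _)))]
    intro j
    rw [PySem.Set.mem_union]
    simp only [List.mem_map, List.mem_filter, Bool.or_eq_true]
    constructor
    · rintro ⟨q, ⟨hq, h | h⟩, rfl⟩
      · exact Or.inl ⟨q, ⟨hq, h⟩, rfl⟩
      · exact Or.inr ⟨q, ⟨hq, h⟩, rfl⟩
    · rintro (⟨q, ⟨hq, h⟩, rfl⟩ | ⟨q, ⟨hq, h⟩, rfl⟩)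
      · exact ⟨q, ⟨hq, Or.inl h⟩, rfl⟩
      · exact ⟨q, ⟨hq, Or.inr h⟩, rfl⟩
  · exact pairwise_lt_fst_filter labeled _

-- membership of q.1 in the forward index list decides Pfwd
lemma mem_fwd_iff (labeled : List (String × String)) (x : String × String)
    {q : Int × (String × String)} (hq : q ∈ PySem.List.enumerate labeled) :
    (q.1 ∈ ((PySem.List.enumerate labeled).filter (fun q => Pfwd x q)).map (fun q => q.1)) ↔
      Pfwd x q = true := by
  constructor
  · rintro h
    rw [List.mem_map] at h
    obtain ⟨q', hq', h1⟩ := h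
    rw [List.mem_filter] at hq'
    have := enum_fst_inj hq'.1 hq h1
    subst this
    exact hq'.2
  · intro h
    exact List.mem_map.mpr ⟨q, List.mem_filter.mpr ⟨hq, h⟩, rfl⟩

lemma hB_stream (labeled : List (String × String)) :
    itertools_combinations_alt labeled = (canonStream labeled).foldl dstep [] := by
  simp only [itertools_combinations_alt]
  rw [PySem.List.foldl_prod_mk
    (fun (d : PySem.Dict String (List Int)) (p : Int × (String × String)) =>
      d.modify (pre3 p.2.2) [] (· ++ [p.1]))
    (fun (d : PySem.Dict String (List Int)) (p : Int × (String × String)) =>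
      d.modify (suf3 p.2.2) [] (· ++ [p.1]))]
  simp only []
  have hbody : ∀ (st : PySem.Set ((String × String) × (String × String)) ×
      List ((String × String) × (String × String))) (p : Int × (String × String)),
      p ∈ PySem.List.enumerate labeled →
      (let fwd : PySem.Set Int := PySem.Set.ofList
          (((PySem.List.enumerate labeled).foldl
            (fun d p => d.modify (pre3 p.2.2) [] (· ++ [p.1])) PySem.Dict.empty).getD (suf3 p.2.2) [])
       let bwd : PySem.Set Int := PySem.Set.ofList
          (((PySem.List.enumerate labeled).foldl
            (fun d p => d.modify (suf3 p.2.2) [] (· ++ [p.1])) PySem.Dict.empty).getD (pre3 p.2.2) [])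
       (PySem.List.sorted (PySem.Set.union fwd bwd) (fun j => j) false).foldl
        (fun st j =>
          if j = p.1 then st
          else
            let t := if PySem.Set.contains fwd j
                     then (p.2, PySem.List.pyGetD labeled j ("", ""))
                     else (PySem.List.pyGetD labeled j ("", ""), p.2)
            if PySem.Set.contains st.1 t then st
            else (PySem.Set.add st.1 t, st.2 ++ [t]))
        st) =
      ((PySem.List.enumerate labeled).filterMap
        (fun q => if q.1 = p.1 then none else justCheckEnds p.2 q.2)).foldl
        (fun st t =>
          if PySem.Set.contains st.1 t then st else (PySem.Set.add st.1 t, st.2 ++ [t])) st := by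
    intro st p hp
    simp only [idx_getD labeled (fun q => pre3 q.2.2) (suf3 p.2.2),
      idx_getD labeled (fun q => suf3 q.2.2) (pre3 p.2.2)]
    rw [show (fun q : Int × (String × String) => pre3 q.2.2 == suf3 p.2.2) = fun q => Pfwd p.2 q from rfl,
      show (fun q : Int × (String × String) => suf3 q.2.2 == pre3 p.2.2) = fun q => Qbwd p.2 q from rfl]
    rw [sorted_union_eq labeled p.2]
    rw [foldl_skip p.1
      (fun j => if (PySem.Set.ofList
          (((PySem.List.enumerate labeled).filter (fun q => Pfwd p.2 q)).map (fun q => q.1))).contains j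
        then (p.2, PySem.List.pyGetD labeled j ("", ""))
        else (PySem.List.pyGetD labeled j ("", ""), p.2))
      (fun st t => if PySem.Set.contains st.1 t then st else (PySem.Set.add st.1 t, st.2 ++ [t]))]
    congr 1
    rw [stream_split p.2 p.1, List.filter_map, List.map_map]
    apply List.map_congr_left
    intro q hq
    rw [List.mem_filter] at hq
    have hqe : q ∈ PySem.List.enumerate labeled := (List.mem_filter.mp hq.1).1
    have hval : PySem.List.pyGetD labeled q.1 ("", "") = q.2 := by
      rw [PySem.List.mem_enumerate_iff] at hqe
      obtain ⟨k, hk, rfl⟩ := hqe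
      simp [pysem, List.getD, List.getElem?_eq_getElem hk]
    simp only [Function.comp_apply]
    by_cases hP : Pfwd p.2 q = true
    · rw [if_pos ((PySem.Set.contains_iff _ _).mpr
        (((PySem.Set.mem_ofList _ _).mpr ((mem_fwd_iff labeled p.2 hqe).mpr hP)))),
        if_pos hP, hval]
    · rw [if_neg (fun hc => hP ((mem_fwd_iff labeled p.2 hqe).mp
        ((PySem.Set.mem_ofList _ _).mp ((PySem.Set.contains_iff _ _).mp hc)))),
        if_neg hP, hval]
  rw [PySem.List.foldl_congr_mem' _ _ (fun st p =>
      ((PySem.List.enumerate labeled).filterMap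
        (fun q => if q.1 = p.1 then none else justCheckEnds p.2 q.2)).foldl
        (fun st t =>
          if PySem.Set.contains st.1 t then st else (PySem.Set.add st.1 t, st.2 ++ [t])) st)
    _ (fun p hp st => hbody st p hp)]
  rw [← List.foldl_flatMap]
  rw [set_dedup_fold _ _ _ (by intro r; rfl)]
  rfl

-- ===== VERDICT (by name: the statement is the Claim_ definition above) =====
theorem itertools_combinations_spec : Claim_equal_itertools_combinations := by
  intro labeled _
  show itertools_combinations labeled = itertools_combinations_alt labeled
  have hA : itertools_combinations labeled =
      ((PySem.List.permutations labeled 2).filterMap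
        (fun pair => justCheckEnds (PySem.List.pyGetD pair 0 ("", "")) (PySem.List.pyGetD pair 1 ("", "")))).foldl dstep [] := by
    unfold itertools_combinations
    rw [foldl_match_filterMap]
  rw [hA, streamA_eq_canon, hB_stream]
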